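-- pv_equiv track=rewrite | github.com/PaddlePaddle/Paddle | python/paddle/distributed/auto_tuner/utils.py | three_mul_combinations
-- ===== SOURCE A (Python) =====
-- def three_mul_combinations(target):
--     """Return the combinations of three numbers which product is target."""
--     results = []
--     for i in range(1, target // 3 + 1):
--         if target % i == 0:
--             for j in range(i, target // 2 + 1):
--                 if (target // i) % j == 0:
--                     results.append((i, j, target // i // j))
--     return results
-- ===== SOURCE B (Python) =====
-- def three_mul_combinations(target):
--     """Return the combinations of three numbers which product is target."""
--
--     def divisors(n):
--         # sorted positive divisors of n via trial division up to sqrt(n); empty if n < 1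
--         small, large = [], []
--         d = 1
--         while d * d <= n:
--             if n % d == 0:
--                 small.append(d)
--                 if d != n // d:
--                     large.append(n // d)
--             d += 1
--         return small + large[::-1]
--
--     results = []
--     for i in divisors(target):
--         if i <= target // 3:
--             m = target // i
--             for j in divisors(m):
--                 if i <= j <= target // 2:
--                     results.append((i, j, m // j))
--     return results
-- ===== Notes on version B (the rewrite author's own statement) =====
-- stated objective: faster
-- what changed: Instead of scanning every integer of a range proportional to target for divisibility in both loops, B enumerates the sorted divisor lists of target and of each cofactor via trial division up to the square root, so only actual divisors are iterated.
import Mathlib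
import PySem

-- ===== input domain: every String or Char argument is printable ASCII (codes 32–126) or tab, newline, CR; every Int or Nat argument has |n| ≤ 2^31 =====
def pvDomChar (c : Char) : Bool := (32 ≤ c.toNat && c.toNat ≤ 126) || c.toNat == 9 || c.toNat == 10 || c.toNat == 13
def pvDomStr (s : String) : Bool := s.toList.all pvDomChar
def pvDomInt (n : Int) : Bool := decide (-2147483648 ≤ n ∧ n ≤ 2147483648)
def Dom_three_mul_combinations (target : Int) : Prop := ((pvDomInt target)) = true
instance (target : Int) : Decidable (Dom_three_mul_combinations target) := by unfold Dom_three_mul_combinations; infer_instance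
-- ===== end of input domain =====

-- B replaces A's full-range divisibility scans by sorted divisor enumeration via trial
-- division up to the square root (asymptotically faster); proved to return the same list.


-- ===== PORT A =====
def three_mul_combinations (target : Int) : List (List Int) :=
  (PySem.List.pyRange 1 (PySem.Int.floordiv target 3 + 1) 1).foldl
    (fun results i =>
      if PySem.Int.mod target i = 0 then
        (PySem.List.pyRange i (PySem.Int.floordiv target 2 + 1) 1).foldl
          (fun results j =>
            if PySem.Int.mod (PySem.Int.floordiv target i) j = 0 then
              results ++ [[i, j, PySem.Int.floordiv (PySem.Int.floordiv target i) j]]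
            else results)
          results
      else results)
    []

-- ===== PORT B =====
-- the 'while d * d <= n' loop of Source B's divisors(); the Nat argument is fuel that only
-- makes the recursion structural (n.toNat steps always suffice; the loop exits on the test)
def pvDivsGo (n : Int) : Nat → Int → List Int → List Int → List Int × List Int
  | 0, _, small, large => (small, large)
  | fuel+1, d, small, large =>
    if d * d ≤ n then
      (if PySem.Int.mod n d = 0 then
        pvDivsGo n fuel (d + 1) (small ++ [d])
          (if d ≠ PySem.Int.floordiv n d then large ++ [PySem.Int.floordiv n d] else large)
      else pvDivsGo n fuel (d + 1) small large)
    else (small, large)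

-- divisors(n) of Source B: small + large[::-1]
def pvDivisors (n : Int) : List Int :=
  (pvDivsGo n n.toNat 1 [] []).1 ++ (pvDivsGo n n.toNat 1 [] []).2.reverse

def three_mul_combinations_alt (target : Int) : List (List Int) :=
  (pvDivisors target).foldl
    (fun results i =>
      if i ≤ PySem.Int.floordiv target 3 then
        (pvDivisors (PySem.Int.floordiv target i)).foldl
          (fun results j =>
            if i ≤ j ∧ j ≤ PySem.Int.floordiv target 2 then
              results ++ [[i, j, PySem.Int.floordiv (PySem.Int.floordiv target i) j]]
            else results)
          results
      else results)
    []

-- ===== PRECONDITION & SPEC =====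
def Spec_three_mul_combinations (target : Int) (out : List (List Int)) : Prop := out = three_mul_combinations_alt target
instance (target : Int) (out : List (List Int)) : Decidable (Spec_three_mul_combinations target out) := by unfold Spec_three_mul_combinations; infer_instance

-- ===== CLAIM (what is proved, stated in full; the proofs are below) =====
def Claim_equal_three_mul_combinations : Prop := ∀ (target : Int), Dom_three_mul_combinations target → Spec_three_mul_combinations target (three_mul_combinations target)

-- ===== LEMMAS AND PROOFS =====

-- characterization of the trial-division loop as filters of a range
theorem pvDivsGo_eq (n : Int) (fuel : Nat) : ∀ (d : Int) (s l : List Int), 1 ≤ d →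
    pvDivsGo n fuel d s l =
      (s ++ (PySem.List.pyRange d (d + fuel) 1).filter
          (fun x => decide (x * x ≤ n ∧ PySem.Int.mod n x = 0)),
       l ++ ((PySem.List.pyRange d (d + fuel) 1).filter
          (fun x => decide (x * x ≤ n ∧ PySem.Int.mod n x = 0 ∧ x ≠ PySem.Int.floordiv n x))).map
          (fun x => PySem.Int.floordiv n x)) := by
  induction fuel with
  | zero =>
    intro d s l hd
    simp [pvDivsGo, PySem.List.pyRange_one_eq_nil (le_refl d)]
  | succ fuel ih =>
    intro d s l hd
    have hr : PySem.List.pyRange d (d + ((fuel : Int) + 1)) 1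
        = d :: PySem.List.pyRange (d + 1) ((d + 1) + (fuel : Int)) 1 := by
      rw [show d + ((fuel : Int) + 1) = (d + 1) + (fuel : Int) from by ring]
      exact PySem.List.pyRange_one_cons (by omega)
    by_cases h1 : d * d ≤ n
    · by_cases h2 : PySem.Int.mod n d = 0
      · simp only [pvDivsGo, if_pos h1, if_pos h2]
        rw [ih (d + 1) _ _ (by omega)]
        push_cast
        rw [hr]
        rw [List.filter_cons_of_pos (by simp only [decide_eq_true_eq]; exact ⟨h1, h2⟩)]
        by_cases h3 : d ≠ PySem.Int.floordiv n d
        · rw [if_pos h3,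
            List.filter_cons_of_pos (by simp only [decide_eq_true_eq]; exact ⟨h1, h2, h3⟩)]
          simp [List.append_assoc]
        · rw [if_neg h3,
            List.filter_cons_of_neg (by simp only [decide_eq_true_eq]; tauto)]
          simp [List.append_assoc]
      · simp only [pvDivsGo, if_pos h1, if_neg h2]
        rw [ih (d + 1) _ _ (by omega)]
        push_cast
        rw [hr,
          List.filter_cons_of_neg (by simp only [decide_eq_true_eq]; tauto),
          List.filter_cons_of_neg (by simp only [decide_eq_true_eq]; tauto)]
    · simp only [pvDivsGo, if_neg h1]
      have hnil : ∀ p : Int → Prop, (∀ x, p x → x * x ≤ n) → ∀ [DecidablePred p],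
          (PySem.List.pyRange d (d + ((fuel : Int) + 1)) 1).filter (fun x => decide (p x)) = [] := by
        intro p hp _
        apply List.filter_eq_nil_iff.mpr
        intro x hx
        rw [PySem.List.mem_pyRange_one] at hx
        simp only [decide_eq_true_eq]
        intro hpx
        have : d * d ≤ x * x := mul_le_mul hx.1 hx.1 (by omega) (by omega)
        exact h1 (le_trans this (hp x hpx))
      push_cast
      rw [hnil _ (fun x hx => hx.1), hnil _ (fun x hx => hx.1)]
      simp

theorem pvDivisors_eq (n : Int) :
    pvDivisors n =
      ((PySem.List.pyRange 1 (1 + n.toNat) 1).filter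
          (fun x => decide (x * x ≤ n ∧ PySem.Int.mod n x = 0)))
      ++ (((PySem.List.pyRange 1 (1 + n.toNat) 1).filter
          (fun x => decide (x * x ≤ n ∧ PySem.Int.mod n x = 0 ∧ x ≠ PySem.Int.floordiv n x))).map
          (fun x => PySem.Int.floordiv n x)).reverse := by
  unfold pvDivisors
  rw [pvDivsGo_eq n n.toNat 1 [] [] (le_refl 1)]
  simp

theorem mem_pvDivisors (n x : Int) :
    x ∈ pvDivisors n ↔ 1 ≤ x ∧ x ≤ n ∧ PySem.Int.mod n x = 0 := by
  rw [pvDivisors_eq]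
  simp only [List.mem_append, List.mem_reverse, List.mem_map, List.mem_filter,
    PySem.List.mem_pyRange_one, decide_eq_true_eq]
  constructor
  · rintro (⟨⟨hx1, -⟩, hxx, hmod⟩ | ⟨y, ⟨⟨hy1, -⟩, hyy, hmod, -⟩, rfl⟩)
    · exact ⟨hx1, by nlinarith, hmod⟩
    · rw [PySem.Int.floordiv_eq_ediv_of_pos (by omega)]
      have hdvd : y ∣ n := (PySem.Int.mod_eq_zero_iff_dvd n y).mp hmod
      have hy : y * (n / y) = n := Int.mul_ediv_cancel' hdvd
      have h1 : 1 ≤ n / y := by nlinarith [Int.lt_or_le (n / y) 1]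
      refine ⟨h1, Int.ediv_le_self y (by nlinarith), ?_⟩
      exact (PySem.Int.mod_eq_zero_iff_dvd n (n / y)).mpr ⟨y, by linarith⟩
  · rintro ⟨hx1, hxn, hmod⟩
    have hdvd : x ∣ n := (PySem.Int.mod_eq_zero_iff_dvd n x).mp hmod
    have hn1 : 1 ≤ n := le_trans hx1 hxn
    have hlt : x < 1 + (n.toNat : Int) := by omega
    by_cases hxx : x * x ≤ n
    · exact Or.inl ⟨⟨hx1, hlt⟩, hxx, hmod⟩
    · right
      have hy : x * (n / x) = n := Int.mul_ediv_cancel' hdvd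
      have hy1 : 1 ≤ n / x := by nlinarith [Int.lt_or_le (n / x) 1]
      have hylt : n / x < x := by nlinarith [Int.lt_or_le (n / x) x]
      have hfd : PySem.Int.floordiv n (n / x) = x := by
        rw [PySem.Int.floordiv_eq_ediv_of_pos (by omega)]
        calc n / (n / x) = (x * (n / x)) / (n / x) := by rw [hy]
          _ = x := Int.mul_ediv_cancel x (by omega)
      refine ⟨n / x, ⟨⟨hy1, by omega⟩, by nlinarith, ?_, ?_⟩, hfd⟩
      · exact (PySem.Int.mod_eq_zero_iff_dvd n (n / x)).mpr ⟨x, by linarith⟩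
      · rw [hfd]; omega

theorem pairwise_pvDivisors (n : Int) : (pvDivisors n).Pairwise (· < ·) := by
  rw [pvDivisors_eq]
  have hdivfact : ∀ y : Int, 1 ≤ y → y * y ≤ n → PySem.Int.mod n y = 0 →
      y * (n / y) = n ∧ y ≤ n / y := by
    intro y hy1 hyy hmod
    have hdvd : y ∣ n := (PySem.Int.mod_eq_zero_iff_dvd n y).mp hmod
    have hy : y * (n / y) = n := Int.mul_ediv_cancel' hdvd
    exact ⟨hy, by nlinarith [Int.lt_or_le (n / y) y]⟩
  apply List.pairwise_append.mpr
  refine ⟨List.Pairwise.filter _ (PySem.List.pairwise_lt_pyRange_one _ _), ?_, ?_⟩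
  · rw [List.pairwise_reverse, List.pairwise_map]
    have hpw : ((PySem.List.pyRange 1 (1 + (n.toNat : Int)) 1).filter
        (fun x => decide (x * x ≤ n ∧ PySem.Int.mod n x = 0 ∧ x ≠ PySem.Int.floordiv n x))).Pairwise
        (fun a b => a < b ∧ (1 ≤ a ∧ a * a ≤ n ∧ PySem.Int.mod n a = 0)
          ∧ (1 ≤ b ∧ b * b ≤ n ∧ PySem.Int.mod n b = 0)) := by
      apply List.Pairwise.imp_of_mem (l := _)
      · intro a b ha hb hab
        have ha' := of_decide_eq_true (List.mem_filter.mp ha).2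
        have hb' := of_decide_eq_true (List.mem_filter.mp hb).2
        have har := PySem.List.mem_pyRange_one.mp (List.mem_of_mem_filter ha)
        have hbr := PySem.List.mem_pyRange_one.mp (List.mem_of_mem_filter hb)
        exact ⟨hab, ⟨har.1, ha'.1, ha'.2.1⟩, ⟨hbr.1, hb'.1, hb'.2.1⟩⟩
      · exact List.Pairwise.filter _ (PySem.List.pairwise_lt_pyRange_one _ _)
    apply hpw.imp
    intro a b ⟨hab, ⟨ha1, haa, hamod⟩, ⟨hb1, hbb, hbmod⟩⟩
    obtain ⟨hfa, hla⟩ := hdivfact a ha1 haa hamod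
    obtain ⟨hfb, hlb⟩ := hdivfact b hb1 hbb hbmod
    rw [PySem.Int.floordiv_eq_ediv_of_pos (by omega),
      PySem.Int.floordiv_eq_ediv_of_pos (by omega)]
    nlinarith [Int.lt_or_le (n / b) (n / a)]
  · intro x hx z hz
    have hx' := of_decide_eq_true (List.mem_filter.mp hx).2
    have hxr := PySem.List.mem_pyRange_one.mp (List.mem_of_mem_filter hx)
    rw [List.mem_reverse, List.mem_map] at hz
    obtain ⟨y, hy, rfl⟩ := hz
    have hy' := of_decide_eq_true (List.mem_filter.mp hy).2
    have hyr := PySem.List.mem_pyRange_one.mp (List.mem_of_mem_filter hy)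
    obtain ⟨hyy, hymod, hyne⟩ := hy'
    obtain ⟨hfy, hly⟩ := hdivfact y hyr.1 hyy hymod
    rw [PySem.Int.floordiv_eq_ediv_of_pos (by omega)] at hyne ⊢
    have hstrict : y < n / y := lt_of_le_of_ne hly hyne
    nlinarith [Int.lt_or_le x (n / y), hx'.1]

-- two strictly increasing lists with the same members are equal
theorem sorted_ext : ∀ (l1 l2 : List Int), l1.Pairwise (· < ·) → l2.Pairwise (· < ·) →
    (∀ x, x ∈ l1 ↔ x ∈ l2) → l1 = l2 := by
  intro l1
  induction l1 with
  | nil =>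
    intro l2 _ _ hm
    cases l2 with
    | nil => rfl
    | cons b t => exact absurd ((hm b).mpr (by simp)) (by simp)
  | cons a t ih =>
    intro l2 h1 h2 hm
    cases l2 with
    | nil => exact absurd ((hm a).mp (by simp)) (by simp)
    | cons b t2 =>
      have hab : a = b := by
        have ha : a ∈ b :: t2 := (hm a).mp (List.mem_cons_self)
        have hb : b ∈ a :: t := (hm b).mpr (List.mem_cons_self)
        rcases List.mem_cons.mp ha with h | h
        · exact h
        rcases List.mem_cons.mp hb with h' | h'
        · exact h'.symm
        have hba := (List.pairwise_cons.mp h2).1 a h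
        have hab := (List.pairwise_cons.mp h1).1 b h'
        omega
      subst hab
      have htail : ∀ x, x ∈ t ↔ x ∈ t2 := by
        intro x
        constructor
        · intro hx
          have hlt := (List.pairwise_cons.mp h1).1 x hx
          rcases List.mem_cons.mp ((hm x).mp (List.mem_cons_of_mem a hx)) with h | h
          · omega
          · exact h
        · intro hx
          have hlt := (List.pairwise_cons.mp h2).1 x hx
          rcases List.mem_cons.mp ((hm x).mpr (List.mem_cons_of_mem a hx)) with h | h
          · omega
          · exact h
      rw [ih t2 (List.pairwise_cons.mp h1).2 (List.pairwise_cons.mp h2).2 htail]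

theorem outer_eq (t : Int) :
    (PySem.List.pyRange 1 (PySem.Int.floordiv t 3 + 1) 1).filter
        (fun i => decide (PySem.Int.mod t i = 0))
    = (pvDivisors t).filter (fun i => decide (i ≤ PySem.Int.floordiv t 3)) := by
  have ht : PySem.Int.floordiv t 3 = t / 3 := PySem.Int.floordiv_eq_ediv_of_pos (by norm_num)
  apply sorted_ext
  · exact List.Pairwise.filter _ (PySem.List.pairwise_lt_pyRange_one _ _)
  · exact List.Pairwise.filter _ (pairwise_pvDivisors t)
  · intro x
    simp only [List.mem_filter, PySem.List.mem_pyRange_one, mem_pvDivisors,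
      decide_eq_true_eq, ht]
    constructor
    · rintro ⟨⟨hx1, hxlt⟩, hm⟩
      exact ⟨⟨hx1, by omega, hm⟩, by omega⟩
    · rintro ⟨⟨hx1, hxt, hm⟩, hx3⟩
      exact ⟨⟨hx1, by omega⟩, hm⟩

theorem inner_eq (t i : Int) (hi1 : 1 ≤ i)
    (hi3 : i ≤ PySem.Int.floordiv t 3) :
    (PySem.List.pyRange i (PySem.Int.floordiv t 2 + 1) 1).filter
        (fun j => decide (PySem.Int.mod (PySem.Int.floordiv t i) j = 0))
    = (pvDivisors (PySem.Int.floordiv t i)).filter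
        (fun j => decide (i ≤ j ∧ j ≤ PySem.Int.floordiv t 2)) := by
  have ht3 : PySem.Int.floordiv t 3 = t / 3 := PySem.Int.floordiv_eq_ediv_of_pos (by norm_num)
  have ht : 3 ≤ t := by rw [ht3] at hi3; omega
  have hit : i ≤ t := by rw [ht3] at hi3; omega
  have hm1 : 1 ≤ PySem.Int.floordiv t i := by
    rw [PySem.Int.floordiv_eq_ediv_of_pos (by omega)]
    rw [Int.le_ediv_iff_mul_le (by omega)]
    omega
  apply sorted_ext
  · exact List.Pairwise.filter _ (PySem.List.pairwise_lt_pyRange_one _ _)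
  · exact List.Pairwise.filter _ (pairwise_pvDivisors _)
  · intro j
    simp only [List.mem_filter, PySem.List.mem_pyRange_one, mem_pvDivisors,
      decide_eq_true_eq]
    constructor
    · rintro ⟨⟨hij, hjlt⟩, hmod⟩
      have hj1 : 1 ≤ j := by omega
      have hjm : j ≤ PySem.Int.floordiv t i := by
        by_contra hgt
        rw [PySem.Int.mod_eq_emod_of_pos (by omega),
          Int.emod_eq_of_lt (by omega) (by omega)] at hmod
        omega
      exact ⟨⟨hj1, hjm, hmod⟩, hij, by omega⟩
    · rintro ⟨⟨hj1, hjm, hmod⟩, hij, hj2⟩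
      exact ⟨⟨hij, by omega⟩, hmod⟩

theorem flatMap_congr_mem {α β : Type} (l : List α) (f g : α → List β)
    (h : ∀ a ∈ l, f a = g a) : l.flatMap f = l.flatMap g := by
  induction l with
  | nil => rfl
  | cons a t ih =>
    simp only [List.flatMap_cons, h a (List.mem_cons_self),
      ih (fun x hx => h x (List.mem_cons_of_mem a hx))]

theorem main_eq (t : Int) : three_mul_combinations t = three_mul_combinations_alt t := by
  unfold three_mul_combinations three_mul_combinations_alt
  simp only [PySem.List.foldl_ite_eq_foldl_filter,
    PySem.List.foldl_append_eq_flatMap, List.nil_append]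
  rw [outer_eq]
  apply flatMap_congr_mem
  intro i hi
  rw [List.mem_filter] at hi
  obtain ⟨himem, hile⟩ := hi
  rw [mem_pvDivisors] at himem
  rw [inner_eq t i himem.1 (of_decide_eq_true hile)]

-- ===== VERDICT (by name: the statement is the Claim_ definition above) =====
theorem three_mul_combinations_spec : Claim_equal_three_mul_combinations := by
  intro t _
  exact main_eq t
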